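-- pv_equiv track=rewrite | github.com/iks15174/study | programmers/110옮기기.py | solution
-- ===== SOURCE A (Python) =====
-- def extract_x(s_el):
--     x_num = 0
--     new_s_el = []
--     for sidx, s in enumerate(s_el):
--         new_s_el.append(s)
--         if len(new_s_el) < 3:
--             continue
--         if "".join(new_s_el[-3 : ]) == "110":
--             x_num += 1
--             for _ in range(3):
--                 new_s_el.pop()
--     return ("".join(new_s_el), x_num)
--
-- def solution(s):
--     answer = []
--     for s_el in s:
--         if s_el.find("110") == -1:
--             answer.append(s_el)
--             continue
--         new_s_el, num = extract_x(s_el)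
--         last_zero = new_s_el.rfind('0')
--         if last_zero == -1:
--             new_s_el = ("110" * num) + new_s_el
--         else:
--             new_s_el = new_s_el[0 : last_zero + 1] + ("110" * num) + new_s_el[last_zero + 1: ]
--         answer.append(new_s_el)
--
--
--     return answer
-- ===== SOURCE B (Python) =====
-- def solution(s):
--     answer = []
--     for w in s:
--         reduced = w
--         removed = 0
--         while True:
--             t = reduced.replace("110", "")
--             if t == reduced:
--                 break
--             removed += (len(reduced) - len(t)) // 3
--             reduced = t
--         if removed == 0:
--             answer.append(w)
--         else:
--             i = reduced.rfind('0') + 1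
--             answer.append(reduced[:i] + "110" * removed + reduced[i:])
--     return answer
-- ===== Notes on version B (the rewrite author's own statement) =====
-- stated objective: simpler
-- what changed: Replaces A's explicit character stack (push each char, pop triples when the last three joined equal '110') by iterating str.replace('110','') to a fixed point, counting removals from the length drop, and unifies A's two reinsertion branches into one splice at rfind('0')+1.
import Mathlib
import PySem

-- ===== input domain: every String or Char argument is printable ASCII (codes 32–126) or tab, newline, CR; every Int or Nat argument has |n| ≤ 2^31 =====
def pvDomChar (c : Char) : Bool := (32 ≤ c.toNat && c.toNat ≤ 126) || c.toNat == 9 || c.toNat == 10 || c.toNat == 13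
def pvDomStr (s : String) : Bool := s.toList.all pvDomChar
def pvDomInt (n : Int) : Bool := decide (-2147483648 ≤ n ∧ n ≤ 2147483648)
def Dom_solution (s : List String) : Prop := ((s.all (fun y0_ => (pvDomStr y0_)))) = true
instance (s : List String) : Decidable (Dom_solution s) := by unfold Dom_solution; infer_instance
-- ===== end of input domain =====

-- B replaces A's explicit character stack by iterating str.replace("110","") to a fixed point
-- (counting removals from the length drop) and unifies A's two reinsertion branches into one
-- splice at rfind('0')+1; objective: simpler (no speed claim).

-- ===== PORT A =====
-- loop body of A's extract_x: push the char, then pop a trailing "110" (counting it).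
-- new_s_el (a Python list of 1-char strings) is carried as a List Char; "".join happens at the
-- point where A builds its answer string.
def extractGo (acc : List Char × Int) (c : Char) : List Char × Int :=
  let st := acc.1 ++ [c]
  if st.length < 3 then (st, acc.2)
  else if PySem.List.slice st (some (-3)) none = ['1', '1', '0'] then
    (st.dropLast.dropLast.dropLast, acc.2 + 1)
  else (st, acc.2)

def extract_x (w : String) : List Char × Int :=
  w.toList.foldl extractGo ([], 0)

-- loop body of A's solution
def stepA (answer : List String) (w : String) : List String :=
  if PySem.Str.find w "110" = -1 then answer ++ [w]
  else
    let p := extract_x w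
    let lz := PySem.Chars.rfind p.1 ['0']
    let res := if lz = -1 then PySem.List.pyRepeat ['1', '1', '0'] p.2 ++ p.1
               else PySem.List.slice p.1 (some 0) (some (lz + 1)) ++
                    PySem.List.pyRepeat ['1', '1', '0'] p.2 ++
                    PySem.List.slice p.1 (some (lz + 1)) none
    answer ++ [String.ofList res]

def solution (s : List String) : List String :=
  s.foldl stepA []

-- ===== PORT B =====
-- Helpers needed by bLoop's termination proof: repL is Python's s.replace("110","") as a
-- structural recursion; replace_eq_repL identifies it with the PySem primitive, and
-- repL_ne_lt shows a changing replace strictly shrinks the string.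
def repL (l : List Char) : List Char :=
  match l with
  | [] => []
  | c :: t => if List.isPrefixOf ['1', '1', '0'] (c :: t) then repL (t.drop 2) else c :: repL t
termination_by l.length
decreasing_by
  · simp
  · simp

theorem repL_nil : repL [] = [] := by rw [repL]

theorem repL_cons (c : Char) (t : List Char) :
    repL (c :: t) = if List.isPrefixOf ['1', '1', '0'] (c :: t) then repL (t.drop 2)
                    else c :: repL t := by
  rw [repL]

theorem prefix_decomp {c : Char} {t : List Char}
    (h : List.isPrefixOf ['1', '1', '0'] (c :: t) = true) :
    c = '1' ∧ t = '1' :: '0' :: t.drop 2 := by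
  rw [List.isPrefixOf_iff_prefix] at h
  obtain ⟨r, hr⟩ := h
  simp only [List.cons_append, List.nil_append, List.cons.injEq] at hr
  obtain ⟨hc, ht⟩ := hr
  subst hc; subst ht
  simp

theorem repL_length_le (l : List Char) : (repL l).length ≤ l.length := by
  induction l using repL.induct with
  | case1 => simp [repL_nil]
  | case2 c t h ih =>
    rw [repL_cons, if_pos h]
    obtain ⟨hc, ht⟩ := prefix_decomp h
    have : t.length = (t.drop 2).length + 2 := by
      conv_lhs => rw [ht]
      simp
    simp only [List.length_cons]; omega
  | case3 c t h ih =>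
    rw [repL_cons, if_neg h]
    simp only [List.length_cons]; omega

theorem repL_infix_lt (l : List Char) (hinf : ['1', '1', '0'] <:+: l) :
    (repL l).length < l.length := by
  induction l using repL.induct with
  | case1 => simp at hinf
  | case2 c t h ih =>
    rw [repL_cons, if_pos h]
    obtain ⟨hc, ht⟩ := prefix_decomp h
    have h1 := repL_length_le (t.drop 2)
    have : t.length = (t.drop 2).length + 2 := by
      conv_lhs => rw [ht]
      simp
    simp only [List.length_cons]; omega
  | case3 c t h ih =>
    rw [repL_cons, if_neg h]
    have ht : ['1', '1', '0'] <:+: t := by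
      rcases List.infix_cons_iff.mp hinf with hp | hs
      · exact absurd (List.isPrefixOf_iff_prefix.mpr hp) (by simpa using h)
      · exact hs
    have := ih ht
    simp only [List.length_cons]; omega

theorem repL_free_eq (l : List Char) (hfree : ¬ ['1', '1', '0'] <:+: l) : repL l = l := by
  induction l using repL.induct with
  | case1 => exact repL_nil
  | case2 c t h ih =>
    exact absurd (List.isPrefixOf_iff_prefix.mp h).isInfix hfree
  | case3 c t h ih =>
    rw [repL_cons, if_neg h, ih]
    intro ht
    exact hfree (List.infix_cons_iff.mpr (Or.inr ht))

theorem repL_ne_lt {l : List Char} (h : repL l ≠ l) : (repL l).length < l.length := by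
  by_cases hi : ['1', '1', '0'] <:+: l
  · exact repL_infix_lt l hi
  · exact absurd (repL_free_eq l hi) h

theorem go_spec : ∀ (fuel : Nat) (l acc : List Char), l.length ≤ fuel →
    PySem.Chars.replace.go ['1', '1', '0'] [] fuel l acc = acc.reverse ++ repL l := by
  intro fuel
  induction fuel with
  | zero =>
    intro l acc h
    have hl : l = [] := by
      cases l with
      | nil => rfl
      | cons a t => simp at h
    subst hl
    simp [PySem.Chars.replace.go, repL_nil]
  | succ f ih =>
    intro l acc h
    cases l with
    | nil => simp [PySem.Chars.replace.go, repL_nil]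
    | cons c t =>
      rw [PySem.Chars.replace.go]
      by_cases hp : List.isPrefixOf ['1', '1', '0'] (c :: t)
      · rw [if_pos hp]
        have hdrop : List.drop (['1', '1', '0'] : List Char).length (c :: t) = t.drop 2 := by
          simp [List.drop_succ_cons]
        rw [hdrop]
        have hlen : (t.drop 2).length ≤ f := by
          simp only [List.length_cons] at h
          have := List.length_drop (l := t) (i := 2)
          omega
        rw [ih _ _ hlen, repL_cons, if_pos hp]
        simp
      · rw [if_neg hp]
        have hlen : t.length ≤ f := by
          simp only [List.length_cons] at h; omega
        rw [ih _ _ hlen, repL_cons, if_neg hp]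
        simp

theorem replace_eq_repL (l : List Char) :
    PySem.Chars.replace l ['1', '1', '0'] [] = repL l := by
  rw [PySem.Chars.replace]
  rw [if_neg (by decide)]
  rw [go_spec l.length l [] (le_refl _)]
  simp

-- B's while-loop: iterate replace("110","") to a fixed point, counting removals by length drop
def bLoop (reduced : List Char) (removed : Int) : List Char × Int :=
  if PySem.Chars.replace reduced ['1', '1', '0'] [] = reduced then (reduced, removed)
  else bLoop (PySem.Chars.replace reduced ['1', '1', '0'] [])
        (removed + PySem.Int.floordiv ((reduced.length : Int) -
           ((PySem.Chars.replace reduced ['1', '1', '0'] []).length : Int)) 3)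
termination_by reduced.length
decreasing_by
  simp only [replace_eq_repL] at *
  exact repL_ne_lt (by assumption)

-- loop body of B's solution
def stepB (answer : List String) (w : String) : List String :=
  let r := bLoop w.toList 0
  if r.2 = 0 then answer ++ [w]
  else
    let i := PySem.Chars.rfind r.1 ['0'] + 1
    answer ++ [String.ofList (PySem.List.slice r.1 none (some i) ++
      PySem.List.pyRepeat ['1', '1', '0'] r.2 ++ PySem.List.slice r.1 (some i) none)]

def solution_alt (s : List String) : List String :=
  s.foldl stepB []

-- ===== PRECONDITION & SPEC =====
def Spec_solution (s : List String) (out : List String) : Prop := out = solution_alt s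
instance (s : List String) (out : List String) : Decidable (Spec_solution s out) := by unfold Spec_solution; infer_instance

-- ===== CLAIM (what is proved, stated in full; the proofs are below) =====
def Claim_equal_solution : Prop := ∀ (s : List String), Dom_solution s → Spec_solution s (solution s)

-- ===== LEMMAS AND PROOFS =====

-- pushing a '1' never triggers A's pop (the last pushed char would have to be '0')
theorem extractGo_one (st : List Char) (n : Int) : extractGo (st, n) '1' = (st ++ ['1'], n) := by
  unfold extractGo
  dsimp only
  by_cases h : (st ++ ['1']).length < 3
  · rw [if_pos h]
  · rw [if_neg h, PySem.List.slice_from_neg_ofNat _ 3 (by omega)]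
    have hne : (st ++ ['1']).drop ((st ++ ['1']).length - 3) ≠ ['1', '1', '0'] := by
      intro he
      have h2 := List.take_append_drop ((st ++ ['1']).length - 3) (st ++ ['1'])
      rw [he] at h2
      have h3 := congrArg List.getLast? h2
      simp at h3
    rw [if_neg hne]

-- pushing a '0' onto a stack ending in "11" pops it back and counts one removal
theorem extractGo_pop (st : List Char) (n : Int) :
    extractGo (st ++ ['1', '1'], n) '0' = (st, n + 1) := by
  unfold extractGo
  have e : (st ++ ['1', '1']) ++ ['0'] = st ++ ['1', '1', '0'] := by simp
  rw [e]
  have hlen : (st ++ ['1', '1', '0']).length = st.length + 3 := by simp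
  rw [if_neg (by omega)]
  rw [PySem.List.slice_from_neg_ofNat _ 3 (by omega)]
  have hd : (st ++ ['1', '1', '0']).drop ((st ++ ['1', '1', '0']).length - 3) = ['1', '1', '0'] := by
    rw [hlen]
    have : st.length + 3 - 3 = st.length := by omega
    rw [this, List.drop_left]
  rw [hd, if_pos rfl]
  have hdl : (st ++ ['1', '1', '0']).dropLast.dropLast.dropLast = st := by
    have e1 : st ++ ['1', '1', '0'] = (st ++ ['1', '1']) ++ ['0'] := by simp
    have e2 : st ++ ['1', '1'] = (st ++ ['1']) ++ ['1'] := by simp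
    rw [e1, List.dropLast_concat, e2, List.dropLast_concat, List.dropLast_concat]
  rw [hdl]

theorem run_110 (st : List Char) (n : Int) (v : List Char) :
    List.foldl extractGo (st, n) ('1' :: '1' :: '0' :: v) = List.foldl extractGo (st, n + 1) v := by
  simp only [List.foldl_cons, extractGo_one]
  have e : (st ++ ['1']) ++ ['1'] = st ++ ['1', '1'] := by simp
  rw [e, extractGo_pop]

-- A's stack update does not depend on the counter
theorem extractGo_fst (st : List Char) (n m : Int) (c : Char) :
    (extractGo (st, n) c).1 = (extractGo (st, m) c).1 := by
  unfold extractGo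
  dsimp only
  split_ifs <;> rfl

theorem run_fst_indep : ∀ (v st : List Char) (n m : Int),
    (List.foldl extractGo (st, n) v).1 = (List.foldl extractGo (st, m) v).1 := by
  intro v
  induction v with
  | nil => intro st n m; rfl
  | cons c t ih =>
    intro st n m
    simp only [List.foldl_cons]
    have h1 := ih (extractGo (st, n) c).1 (extractGo (st, n) c).2 (extractGo (st, m) c).2
    rw [Prod.mk.eta] at h1
    rw [h1, extractGo_fst st n m c, Prod.mk.eta]

theorem run_repL (l : List Char) : ∀ (st : List Char) (n m : Int),
    (List.foldl extractGo (st, n) (repL l)).1 = (List.foldl extractGo (st, m) l).1 := by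
  induction l using repL.induct with
  | case1 => intro st n m; simp [repL_nil]
  | case2 c t h ih =>
    intro st n m
    obtain ⟨hc, ht⟩ := prefix_decomp h
    rw [repL_cons, if_pos h]
    conv_rhs => rw [hc, ht]
    rw [run_110]
    exact ih st n (m + 1)
  | case3 c t h ih =>
    intro st n m
    rw [repL_cons, if_neg h]
    simp only [List.foldl_cons]
    have h1 := ih (extractGo (st, n) c).1 (extractGo (st, n) c).2 (extractGo (st, m) c).2
    rw [Prod.mk.eta] at h1
    rw [h1, extractGo_fst st n m c, Prod.mk.eta]

-- one A-step never pops unless the stack+char ends in "110"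
theorem extractGo_free (u : List Char) (c : Char) (n : Int)
    (h : ¬ ['1', '1', '0'] <:+: (u ++ [c])) : extractGo (u, n) c = (u ++ [c], n) := by
  unfold extractGo
  dsimp only
  by_cases hl : (u ++ [c]).length < 3
  · rw [if_pos hl]
  · rw [if_neg hl, PySem.List.slice_from_neg_ofNat _ 3 (by omega)]
    have hne : (u ++ [c]).drop ((u ++ [c]).length - 3) ≠ ['1', '1', '0'] := by
      intro he
      have h2 := List.take_append_drop ((u ++ [c]).length - 3) (u ++ [c])
      rw [he] at h2
      exact h (List.IsSuffix.isInfix ⟨_, h2⟩)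
    rw [if_neg hne]

theorem free_run : ∀ (v u : List Char) (n : Int), ¬ ['1', '1', '0'] <:+: (u ++ v) →
    List.foldl extractGo (u, n) v = (u ++ v, n) := by
  intro v
  induction v with
  | nil => intro u n h; simp
  | cons c t ih =>
    intro u n h
    rw [List.append_cons] at h
    simp only [List.foldl_cons]
    rw [extractGo_free u c n (fun hin => h (hin.trans ⟨[], t, by simp⟩)),
        ih (u ++ [c]) n h, List.append_assoc]
    simp

theorem extractGo_len (st : List Char) (n : Int) (c : Char) :
    ((extractGo (st, n) c).1.length : Int) + 3 * (extractGo (st, n) c).2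
      = (st.length : Int) + 1 + 3 * n := by
  unfold extractGo
  dsimp only
  split_ifs with h1 h2
  · simp
  · simp only [List.length_dropLast, List.length_append, List.length_cons, List.length_nil]
    simp only [List.length_append, List.length_cons, List.length_nil] at h1
    have : st.length + 1 ≥ 3 := by omega
    push_cast
    omega
  · simp

theorem run_len : ∀ (v st : List Char) (n : Int),
    ((List.foldl extractGo (st, n) v).1.length : Int) + 3 * (List.foldl extractGo (st, n) v).2
      = (st.length : Int) + 3 * n + v.length := by
  intro v
  induction v with
  | nil => intro st n; simp
  | cons c t ih =>
    intro st n
    simp only [List.foldl_cons, List.length_cons]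
    have h1 := extractGo_len st n c
    have h2 := ih (extractGo (st, n) c).1 (extractGo (st, n) c).2
    rw [Prod.mk.eta] at h2
    rw [h2]
    push_cast
    omega

theorem repL_len_mod : ∀ l : List Char, ∃ k : Nat, l.length = (repL l).length + 3 * k := by
  intro l
  induction l using repL.induct with
  | case1 => exact ⟨0, by simp [repL_nil]⟩
  | case2 c t h ih =>
    obtain ⟨k, hk⟩ := ih
    obtain ⟨hc, ht⟩ := prefix_decomp h
    refine ⟨k + 1, ?_⟩
    rw [repL_cons, if_pos h]
    have : t.length = (t.drop 2).length + 2 := by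
      conv_lhs => rw [ht]
      simp
    simp only [List.length_cons]; omega
  | case3 c t h ih =>
    obtain ⟨k, hk⟩ := ih
    refine ⟨k, ?_⟩
    rw [repL_cons, if_neg h]
    simp only [List.length_cons]; omega

theorem bLoop_spec : ∀ (cs : List Char) (r : Int),
    (¬ ['1', '1', '0'] <:+: (bLoop cs r).1) ∧
    (∀ (st : List Char) (n m : Int),
      (List.foldl extractGo (st, n) ((bLoop cs r).1)).1 = (List.foldl extractGo (st, m) cs).1) ∧
    (∃ k : Nat, cs.length = ((bLoop cs r).1).length + 3 * k ∧ (bLoop cs r).2 = r + k ∧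
      (['1', '1', '0'] <:+: cs → 1 ≤ k)) := by
  intro cs r
  induction cs, r using bLoop.induct with
  | case1 cs r h =>
    rw [bLoop, if_pos h]
    have hfix : repL cs = cs := by rw [← replace_eq_repL]; exact h
    have hfree : ¬ ['1', '1', '0'] <:+: cs := by
      intro hin
      have := repL_infix_lt cs hin
      rw [hfix] at this
      omega
    exact ⟨hfree, fun st n m => run_fst_indep cs st n m,
      ⟨0, by simp, by simp, fun hin => absurd hin hfree⟩⟩
  | case2 cs r h ih =>
    rw [bLoop, if_neg h]
    obtain ⟨ihfree, ihrun, k2, hk2len, hk2cnt, _⟩ := ih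
    obtain ⟨k1, hk1⟩ := repL_len_mod cs
    have hrepl : PySem.Chars.replace cs ['1', '1', '0'] [] = repL cs := replace_eq_repL cs
    have hlt : (repL cs).length < cs.length :=
      repL_ne_lt (by rw [← hrepl]; exact h)
    have hk1pos : 1 ≤ k1 := by omega
    have hfd : PySem.Int.floordiv ((cs.length : Int) -
        ((PySem.Chars.replace cs ['1', '1', '0'] []).length : Int)) 3 = k1 := by
      rw [hrepl]
      have : (cs.length : Int) - ((repL cs).length : Int) = 3 * (k1 : Int) := by
        omega
      rw [this, PySem.Int.floordiv_eq_ediv_of_pos (by norm_num),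
        Int.mul_ediv_cancel_left _ (by norm_num)]
    rw [hrepl] at ihfree ihrun hk2len hk2cnt hfd ⊢
    refine ⟨ihfree, ?_, ⟨k1 + k2, ?_, ?_, fun _ => by omega⟩⟩
    · intro st n m
      rw [ihrun st n m, run_repL cs st m m]
    · rw [hk2len] at hk1; omega
    · rw [hk2cnt, hfd]; push_cast; ring

theorem step_eq (answer : List String) (w : String) : stepA answer w = stepB answer w := by
  by_cases hf : ['1', '1', '0'] <:+: w.toList
  · have hfind : ¬ (PySem.Str.find w "110" = -1) := by
      have hb : PySem.Str.find w "110" = PySem.Chars.find w.toList ['1', '1', '0'] := by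
        simp [PySem.Str.find_eq]
      rw [hb, PySem.Chars.find_eq_neg_one_iff]
      exact fun hn => hn hf
    unfold stepA stepB
    rw [if_neg hfind]
    obtain ⟨hfree, hrun, k, hlen, hcnt, hpos⟩ := bLoop_spec w.toList 0
    have hb1 : (bLoop w.toList 0).1 = (extract_x w).1 := by
      have hfr := free_run (bLoop w.toList 0).1 [] 0 (by simpa using hfree)
      have h0 := hrun [] 0 0
      rw [hfr] at h0
      simpa [extract_x] using h0
    have hl := run_len w.toList [] 0
    have hnum : (bLoop w.toList 0).2 = (extract_x w).2 := by
      have hpl : ((extract_x w).1.length : Int) + 3 * (extract_x w).2 = (w.toList.length : Int) := by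
        simpa [extract_x] using hl
      rw [← hb1] at hpl
      omega
    have hb2 : ¬ ((bLoop w.toList 0).2 = 0) := by
      have := hpos hf
      omega
    rw [if_neg hb2]
    dsimp only
    rw [hb1, hnum]
    by_cases hlz : PySem.Chars.rfind (extract_x w).1 ['0'] = -1
    · rw [if_pos hlz, hlz]
      norm_num
      simp [PySem.List.slice]
    · rw [if_neg hlz]
      simp [PySem.List.slice_zero_start]
  · have hfind : PySem.Str.find w "110" = -1 := by
      have hb : PySem.Str.find w "110" = PySem.Chars.find w.toList ['1', '1', '0'] := by
        simp [PySem.Str.find_eq]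
      rw [hb, PySem.Chars.find_eq_neg_one_iff]
      exact hf
    have hfix : PySem.Chars.replace w.toList ['1', '1', '0'] [] = w.toList := by
      rw [replace_eq_repL]
      exact repL_free_eq _ hf
    unfold stepA stepB
    rw [if_pos hfind, bLoop, if_pos hfix]
    simp

theorem fold_eq : ∀ (s acc : List String), List.foldl stepA acc s = List.foldl stepB acc s := by
  intro s
  induction s with
  | nil => intro acc; rfl
  | cons w ws ih =>
    intro acc
    rw [List.foldl_cons, List.foldl_cons, step_eq, ih]

-- ===== VERDICT (by name: the statement is the Claim_ definition above) =====
theorem solution_spec : Claim_equal_solution := by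
  intro s _
  unfold Spec_solution solution solution_alt
  exact fold_eq s []
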